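-- pv_equiv track=rewrite | github.com/offbynull/offbynull.github.io | docs/data/learn/Bioinformatics/input/ch5_code/src/Stepik.5.20.ExerciseBreak.EntropyScoreForMarahiels3WayAlignment.py | column_count_by_element
-- ===== SOURCE A (Python) =====
-- from typing import List, Dict
--
-- def column_count_by_element(alignment_matrix: List[str], elements: str) -> Dict[str, List[int]]:
--     rows = len(alignment_matrix)
--     cols = len(alignment_matrix[0])
--
--     ret = {}
--     for ch in elements:
--         ret[ch] = [0] * cols
--
--     for c in range(0, cols):
--         for r in range(0, rows):
--             item = alignment_matrix[r][c]
--             ret[item][c] += 1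
--
--     return ret
-- ===== SOURCE B (Python) =====
-- from typing import List, Dict
--
-- def column_count_by_element(alignment_matrix: List[str], elements: str) -> Dict[str, List[int]]:
--     cols = len(alignment_matrix[0])
--     columns = [''.join(row[c] for row in alignment_matrix) for c in range(cols)]
--     return {ch: [col.count(ch) for col in columns] for ch in elements}
-- ===== Notes on version B (the rewrite author's own statement) =====
-- stated objective: idiomatic
-- what changed: Replaces the per-cell dict-increment double loop with a two-phase pass: build each column string once, then produce the whole result as a dict comprehension tallying each column with str.count per element.
import Mathlib
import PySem

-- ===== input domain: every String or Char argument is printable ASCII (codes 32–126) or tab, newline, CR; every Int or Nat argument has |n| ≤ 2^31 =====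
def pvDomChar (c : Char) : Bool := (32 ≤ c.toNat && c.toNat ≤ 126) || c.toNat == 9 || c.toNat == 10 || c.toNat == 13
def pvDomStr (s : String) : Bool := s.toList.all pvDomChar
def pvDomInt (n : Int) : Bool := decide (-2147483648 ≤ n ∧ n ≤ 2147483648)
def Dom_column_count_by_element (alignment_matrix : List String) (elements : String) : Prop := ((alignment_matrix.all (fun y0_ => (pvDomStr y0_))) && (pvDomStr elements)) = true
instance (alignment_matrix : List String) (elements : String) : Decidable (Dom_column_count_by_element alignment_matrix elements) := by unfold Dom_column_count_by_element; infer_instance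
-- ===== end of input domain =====

-- B replaces A's per-cell dict-increment double loop by building each column once and
-- tallying it with a per-element count (idiomatic two-phase tabulation; not claimed faster).

-- ===== PORT A =====
-- literal port of A: zero-init dict over elements, then `ret[m[r][c]][c] += 1` per cell,
-- column-major.  Out-of-range getD defaults are unreachable inside Pre_ (Python raises there);
-- the `none` branch of the lookup is Python's KeyError, also outside Pre_.
def column_count_by_element (alignment_matrix : List String) (elements : String) : List (String × List Int) :=
  let rows := alignment_matrix.length
  let cols := ((alignment_matrix.headD "").toList).length
  let ret0 : PySem.Dict String (List Int) :=
    elements.toList.foldl (fun d ch => d.insert (String.ofList [ch]) (List.replicate cols 0)) PySem.Dict.empty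
  let ret := (List.range cols).foldl (fun d c =>
      (List.range rows).foldl (fun d r =>
        let item := String.ofList [((alignment_matrix.getD r "").toList).getD c ' ']
        match d.get? item with
        | some v => d.insert item (v.set c (v.getD c 0 + 1))
        | none => d) d) ret0
  ret.items

-- ===== PORT B =====
-- literal port of Source B: columns built first, then a dict comprehension counting each
-- column per element char.
def column_count_by_element_alt (alignment_matrix : List String) (elements : String) : List (String × List Int) :=
  let cols := ((alignment_matrix.headD "").toList).length
  let columns : List (List Char) :=
    (List.range cols).map (fun c => alignment_matrix.map (fun row => row.toList.getD c ' '))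
  (elements.toList.foldl (fun d ch =>
      d.insert (String.ofList [ch]) (columns.map (fun col => (col.count ch : Int)))) PySem.Dict.empty).items

-- ===== PRECONDITION & SPEC =====
-- Pre_ excludes exactly the inputs on which Python A raises: an empty matrix (IndexError on
-- alignment_matrix[0]), a row shorter than the first row (IndexError on row[c]), and a matrix
-- character within the first cols columns that is not in elements (KeyError).
def Pre_column_count_by_element (alignment_matrix : List String) (elements : String) : Prop :=
  alignment_matrix ≠ [] ∧
  (∀ row ∈ alignment_matrix, ((alignment_matrix.headD "").toList).length ≤ row.toList.length) ∧
  (∀ row ∈ alignment_matrix, ∀ c < ((alignment_matrix.headD "").toList).length,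
      row.toList.getD c ' ' ∈ elements.toList)
instance (alignment_matrix : List String) (elements : String) : Decidable (Pre_column_count_by_element alignment_matrix elements) := by unfold Pre_column_count_by_element; infer_instance
def pvWitness_column_count_by_element : List String × String := (["AB", "AC"], "ABC")

def Spec_column_count_by_element (alignment_matrix : List String) (elements : String) (out : List (String × List Int)) : Prop := out = column_count_by_element_alt alignment_matrix elements
instance (alignment_matrix : List String) (elements : String) (out : List (String × List Int)) : Decidable (Spec_column_count_by_element alignment_matrix elements out) := by unfold Spec_column_count_by_element; infer_instance

-- ===== CLAIM (what is proved, stated in full; the proofs are below) =====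
def Claim_equal_column_count_by_element : Prop := ∀ (alignment_matrix : List String) (elements : String), Dom_column_count_by_element alignment_matrix elements → Pre_column_count_by_element alignment_matrix elements → Spec_column_count_by_element alignment_matrix elements (column_count_by_element alignment_matrix elements)

-- ===== LEMMAS AND PROOFS =====

theorem pv_foldl_range_getD {α β : Type} (l : List α) (d0 : α) (f : β → α → β) (b : β) :
    (List.range l.length).foldl (fun acc i => f acc (l.getD i d0)) b = l.foldl f b := by
  induction l using List.reverseRecOn generalizing b with
  | nil => rfl
  | append_singleton t a ih =>
      simp only [List.length_append, List.length_singleton, List.range_succ, List.foldl_append,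
        List.foldl_cons, List.foldl_nil]
      have h1 : ∀ b', List.foldl (fun acc i => f acc ((t ++ [a]).getD i d0)) b' (List.range t.length)
          = List.foldl (fun acc i => f acc (t.getD i d0)) b' (List.range t.length) := by
        intro b'
        apply PySem.List.foldl_congr_mem
        intro acc i hi
        rw [List.mem_range] at hi
        simp [List.getElem?_append_left hi, hi, List.getElem?_eq_getElem hi]
      have h2 : (t ++ [a]).getD t.length d0 = a := by
        simp [List.getD_eq_getElem?_getD]
      rw [h1, h2, ih]

theorem pv_rowfold (ch : Char) (c : Nat) (l : List Char) (v : List Int) (hc : c < v.length) :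
    l.foldl (fun v a => if ch = a then v.set c (v.getD c 0 + 1) else v) v =
    v.set c (v.getD c 0 + (l.count ch : Int)) := by
  induction l generalizing v with
  | nil => simp [List.getD_eq_getElem?_getD, List.getElem?_eq_getElem hc, List.set_getElem_self]
  | cons a t ih =>
      simp only [List.foldl_cons]
      by_cases h : ch = a
      · rw [if_pos h]
        rw [ih _ (by simpa using hc)]
        rw [List.set_set]
        have : (v.set c (v.getD c 0 + 1)).getD c 0 = v.getD c 0 + 1 := by
          simp [List.getD_eq_getElem?_getD, List.getElem?_set_self, hc,
            List.getElem?_eq_getElem hc]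
        rw [this]
        rw [List.count_cons]
        simp [h.symm]
        push_cast
        ring_nf
      · rw [if_neg h, ih _ hc, List.count_cons]
        have : (a == ch) = false := by simpa using fun e => h e.symm
        simp [this]

theorem pv_colfold_aux (cols : Nat) (w : Nat → Int) (n : Nat) (hn : n ≤ cols) :
    (List.range n).foldl (fun v c => v.set c (v.getD c 0 + w c)) (List.replicate cols 0) =
    (List.range n).map w ++ List.replicate (cols - n) 0 := by
  induction n with
  | zero => simp
  | succ k ih =>
      have hk : k ≤ cols := Nat.le_of_succ_le hn
      rw [List.range_succ, List.foldl_append, ih hk, List.foldl_cons, List.foldl_nil]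
      have hlen : ((List.range k).map w).length = k := by simp
      have hget : (((List.range k).map w) ++ List.replicate (cols - k) 0).getD k 0 = 0 := by
        rw [List.getD_eq_getElem?_getD, List.getElem?_append_right (by omega)]
        have : 0 < cols - k := by omega
        simp [hlen, List.getElem?_replicate, this]
      rw [hget]
      rw [List.set_append_right _ _ (by omega), hlen]
      have : cols - k = (cols - (k+1)) + 1 := by omega
      rw [this]
      simp [List.range_succ, List.replicate_succ, List.set_cons_zero]

theorem pv_step_map (d : PySem.Dict String (List Int)) (k : String) (f : List Int → List Int)
    (hnd : (d.items.map Prod.fst).Nodup) :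
    (match d.get? k with
     | some v => d.insert k (f v)
     | none => d) =
    PySem.Dict.mk (d.items.map (fun p => if p.1 = k then (p.1, f p.2) else p)) := by
  cases hg : d.get? k with
  | none =>
      have hfind : d.items.find? (fun p => p.1 == k) = none := by
        simp only [PySem.Dict.get?] at hg
        exact Option.map_eq_none_iff.mp hg
      have hnone : ∀ p ∈ d.items, p.1 ≠ k := by
        intro p hp
        have := List.find?_eq_none.mp hfind p hp
        simpa using this
      apply PySem.Dict.ext
      simp only
      rw [List.map_congr_left (fun p hp => by rw [if_neg (hnone p hp)]), List.map_id']
  | some v =>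
      have hcont : d.contains k = true := by
        simp only [PySem.Dict.get?] at hg
        obtain ⟨p, hp, hv⟩ := Option.map_eq_some_iff.mp hg
        exact List.any_eq_true.mpr ⟨p, List.mem_of_find?_eq_some hp, by
          have := List.find?_some hp; simpa using this⟩
      apply PySem.Dict.ext
      simp only [PySem.Dict.items_insert_of_contains d (f v) hcont]
      apply List.map_congr_left
      intro p hp
      by_cases h : p.1 = k
      · have : d.get? p.1 = some p.2 := PySem.Dict.get?_of_mem_items d (by simpa using hp) hnd
        rw [h] at this
        rw [hg] at this
        have hv : v = p.2 := Option.some_inj.mp this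
        simp [h, hv]
      · simp [h]

theorem pv_fold_map {α : Type} (l : List α) (key : α → String) (g : α → List Int → List Int)
    (d : PySem.Dict String (List Int)) (hnd : (d.items.map Prod.fst).Nodup) :
    l.foldl (fun d a =>
        match d.get? (key a) with
        | some v => d.insert (key a) (g a v)
        | none => d) d =
    PySem.Dict.mk (d.items.map (fun p =>
        (p.1, l.foldl (fun v a => if p.1 = key a then g a v else v) p.2))) := by
  induction l generalizing d with
  | nil =>
      apply PySem.Dict.ext
      simp
  | cons a t ih =>
      rw [List.foldl_cons, pv_step_map d (key a) (g a) hnd]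
      have hkeys : ((d.items.map (fun p => if p.1 = key a then (p.1, g a p.2) else p)).map Prod.fst)
          = d.items.map Prod.fst := by
        rw [List.map_map]
        apply List.map_congr_left
        intro p _
        by_cases h : p.1 = key a <;> simp [h]
      rw [ih _ (by rw [hkeys]; exact hnd)]
      apply PySem.Dict.ext
      simp only [List.map_map]
      apply List.map_congr_left
      intro p _
      by_cases h : p.1 = key a <;> simp [h, List.foldl_cons]

theorem pv_map_insert (d : PySem.Dict String (List Int)) (k : String) (v : List Int)
    (h : String → List Int → List Int) :
    PySem.Dict.mk ((d.insert k v).items.map (fun p => (p.1, h p.1 p.2))) =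
    (PySem.Dict.mk (d.items.map (fun p => (p.1, h p.1 p.2)))).insert k (h k v) := by
  have hcont : (PySem.Dict.mk (d.items.map (fun p => (p.1, h p.1 p.2)))).contains k = d.contains k := by
    simp only [PySem.Dict.contains, List.any_map]
    rfl
  apply PySem.Dict.ext
  cases hc : d.contains k with
  | true =>
      rw [PySem.Dict.items_insert_of_contains _ _ (hcont.trans hc)]
      simp only [PySem.Dict.items_insert_of_contains d v hc, List.map_map]
      apply List.map_congr_left
      intro p _
      by_cases hk : p.1 = k <;> simp [hk]
  | false =>
      rw [PySem.Dict.items_insert_of_not_contains _ _ (hcont.trans hc)]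
      simp [PySem.Dict.items_insert_of_not_contains d v hc]

theorem pv_map_insert_fold (l : List Char) (a : Char → List Int) (h : String → List Int → List Int)
    (d0 : PySem.Dict String (List Int)) :
    (l.foldl (fun d ch => d.insert (String.ofList [ch]) (a ch)) d0).items.map
        (fun p => (p.1, h p.1 p.2)) =
    (l.foldl (fun d ch => d.insert (String.ofList [ch]) (h (String.ofList [ch]) (a ch)))
        (PySem.Dict.mk (d0.items.map (fun p => (p.1, h p.1 p.2))))).items := by
  induction l generalizing d0 with
  | nil => rfl
  | cons ch t ih =>
      rw [List.foldl_cons, ih, List.foldl_cons, pv_map_insert]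

theorem pv_outer (m : List String) (key : Nat → String → String)
    (g : Nat → List Int → List Int) (cs : List Nat)
    (d : PySem.Dict String (List Int)) (hnd : (d.items.map Prod.fst).Nodup) :
    cs.foldl (fun d c => m.foldl (fun d row =>
        match d.get? (key c row) with
        | some v => d.insert (key c row) (g c v)
        | none => d) d) d =
    PySem.Dict.mk (d.items.map (fun p =>
        (p.1, cs.foldl (fun v c => m.foldl (fun v row => if p.1 = key c row then g c v else v) v) p.2))) := by
  induction cs generalizing d with
  | nil =>
      apply PySem.Dict.ext
      simp
  | cons c t ih =>
      rw [List.foldl_cons, pv_fold_map m (key c) (fun _ v => g c v) d hnd]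
      have hkeys : ((d.items.map (fun p => (p.1, m.foldl (fun v row => if p.1 = key c row then g c v else v) p.2))).map Prod.fst)
          = d.items.map Prod.fst := by
        rw [List.map_map]; rfl
      rw [ih _ (by rw [hkeys]; exact hnd)]
      apply PySem.Dict.ext
      simp only [List.map_map]
      apply List.map_congr_left
      intro p _
      simp [List.foldl_cons]

theorem pv_ofList_inj (a b : Char) : (String.ofList [a] = String.ofList [b]) ↔ a = b := by
  constructor
  · intro h
    have := congrArg String.toList h
    simpa using this
  · intro h; rw [h]

theorem pv_inner_to_set (m : List String) (ch : Char) (w : Nat → Int)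
    (hw : ∀ c, w c = ((m.map (fun row => row.toList.getD c ' ')).count ch : Int))
    (cs : List Nat) (v : List Int) (hv : ∀ c ∈ cs, c < v.length) :
    cs.foldl (fun v c => m.foldl (fun v row =>
        if String.ofList [ch] = String.ofList [row.toList.getD c ' ']
        then v.set c (v.getD c 0 + 1) else v) v) v =
    cs.foldl (fun v c => v.set c (v.getD c 0 + w c)) v := by
  induction cs generalizing v with
  | nil => rfl
  | cons c t ih =>
      simp only [List.foldl_cons]
      have h1 : m.foldl (fun v row =>
          if String.ofList [ch] = String.ofList [row.toList.getD c ' ']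
          then v.set c (v.getD c 0 + 1) else v) v
          = v.set c (v.getD c 0 + w c) := by
        have hcongr : m.foldl (fun v row =>
            if String.ofList [ch] = String.ofList [row.toList.getD c ' ']
            then v.set c (v.getD c 0 + 1) else v) v
            = m.foldl (fun v row =>
            if ch = row.toList.getD c ' '
            then v.set c (v.getD c 0 + 1) else v) v := by
          apply PySem.List.foldl_congr_mem
          intro acc x _
          by_cases h : ch = x.toList.getD c ' '
          · rw [if_pos ((pv_ofList_inj _ _).mpr h), if_pos h]
          · rw [if_neg (fun e => h ((pv_ofList_inj _ _).mp e)), if_neg h]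
        rw [hcongr,
          ← List.foldl_map (f := fun (row : String) => row.toList.getD c ' ')
            (g := fun (v : List Int) (a : Char) => if ch = a then v.set c (v.getD c 0 + 1) else v),
          pv_rowfold ch c _ v (hv c (List.mem_cons_self))]
        rw [hw c]
      rw [h1, ih]
      intro c' hc'
      rw [List.length_set]
      exact hv c' (List.mem_cons_of_mem _ hc')

theorem pv_colfold (cols : Nat) (w : Nat → Int) :
    (List.range cols).foldl (fun v c => v.set c (v.getD c 0 + w c)) (List.replicate cols 0) =
    (List.range cols).map w := by
  have := pv_colfold_aux cols w cols le_rfl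
  simpa using this

theorem pv_mk_items {κ ν : Type} (X : List (κ × ν)) : (PySem.Dict.mk X).items = X := rfl

theorem pv_main (m : List String) (e : String) :
    column_count_by_element m e = column_count_by_element_alt m e := by
  unfold column_count_by_element column_count_by_element_alt
  simp only []
  set cols := ((m.headD "").toList).length with hcols
  -- replace the inner range-fold by a fold over m
  have hA1 : ∀ (c : Nat) (d : PySem.Dict String (List Int)),
      (List.range m.length).foldl (fun d r =>
        match d.get? (String.ofList [((m.getD r "").toList).getD c ' ']) with
        | some v => d.insert (String.ofList [((m.getD r "").toList).getD c ' ']) (v.set c (v.getD c 0 + 1))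
        | none => d) d
      = m.foldl (fun d row =>
        match d.get? (String.ofList [row.toList.getD c ' ']) with
        | some v => d.insert (String.ofList [row.toList.getD c ' ']) (v.set c (v.getD c 0 + 1))
        | none => d) d := by
    intro c d
    exact pv_foldl_range_getD m ""
      (fun d row =>
        match d.get? (String.ofList [row.toList.getD c ' ']) with
        | some v => d.insert (String.ofList [row.toList.getD c ' ']) (v.set c (v.getD c 0 + 1))
        | none => d) d
  have hfun : (fun (d : PySem.Dict String (List Int)) (c : Nat) =>
      (List.range m.length).foldl (fun d r =>
        match d.get? (String.ofList [((m.getD r "").toList).getD c ' ']) with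
        | some v => d.insert (String.ofList [((m.getD r "").toList).getD c ' ']) (v.set c (v.getD c 0 + 1))
        | none => d) d)
      = (fun d c => m.foldl (fun d row =>
        match d.get? (String.ofList [row.toList.getD c ' ']) with
        | some v => d.insert (String.ofList [row.toList.getD c ' ']) (v.set c (v.getD c 0 + 1))
        | none => d) d) := by
    funext d c; exact hA1 c d
  rw [hfun]
  have hnd : (((e.toList.foldl (fun d ch => d.insert (String.ofList [ch]) (List.replicate cols 0)) PySem.Dict.empty) : PySem.Dict String (List Int)).items.map Prod.fst).Nodup :=
    PySem.Dict.nodup_keys_foldl_insert_key e.toList (fun ch => String.ofList [ch])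
      (fun _ _ => List.replicate cols 0) PySem.Dict.empty PySem.Dict.nodup_keys_empty
  rw [pv_outer m (fun c row => String.ofList [row.toList.getD c ' '])
      (fun c v => v.set c (v.getD c 0 + 1)) (List.range cols) _ hnd]
  rw [pv_mk_items]
  rw [pv_map_insert_fold e.toList (fun _ => List.replicate cols 0)
      (fun k v => (List.range cols).foldl (fun v c => m.foldl (fun v row => if k = String.ofList [row.toList.getD c ' '] then v.set c (v.getD c 0 + 1) else v) v) v)
      PySem.Dict.empty]
  have hval : ∀ ch : Char,
      (List.range cols).foldl (fun v c => m.foldl (fun v row => if String.ofList [ch] = String.ofList [row.toList.getD c ' '] then v.set c (v.getD c 0 + 1) else v) v) (List.replicate cols 0)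
      = ((List.range cols).map (fun c => m.map (fun row => row.toList.getD c ' '))).map (fun col => (col.count ch : Int)) := by
    intro ch
    rw [pv_inner_to_set m ch (fun c => ((m.map (fun row => row.toList.getD c ' ')).count ch : Int))
        (fun _ => rfl) (List.range cols) (List.replicate cols 0)
        (by intro c hc; rw [List.length_replicate]; exact List.mem_range.mp hc)]
    rw [pv_colfold, List.map_map]
    rfl
  have hfun2 : (fun (d : PySem.Dict String (List Int)) (ch : Char) =>
        d.insert (String.ofList [ch])
          ((List.range cols).foldl (fun v c => m.foldl (fun v row => if String.ofList [ch] = String.ofList [row.toList.getD c ' '] then v.set c (v.getD c 0 + 1) else v) v) (List.replicate cols 0)))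
      = (fun d ch => d.insert (String.ofList [ch])
          (((List.range cols).map (fun c => m.map (fun row => row.toList.getD c ' '))).map (fun col => (col.count ch : Int)))) := by
    funext d ch; rw [hval ch]
  rw [hfun2]
  rfl

-- ===== VERDICT (by name: the statement is the Claim_ definition above) =====
theorem column_count_by_element_spec : Claim_equal_column_count_by_element := by
  intro m e _ _
  unfold Spec_column_count_by_element
  exact pv_main m e
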